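-- pv_equiv track=rewrite | github.com/edelveart/figuratenum | src/figuratenum/multidimensional_figurate_numbers/multidim_ogf_z.py | helper_coeffs
-- ===== SOURCE A (Python) =====
-- from math import comb
-- import math
--
-- def helper_a_i_k(i, k):
--     return sum(
--         (-1)**j * comb(k + 1, j) * (i + 1 - j)**k
--         for j in range(i + 1)
--     )
--
-- def helper_coeffs(k):
--     coeffs = [0] * k
--     coeffs[0] = 1
--     coeffs[k - 1] = 1
--
--     p = math.floor((k - 1) / 2)
--     for i in range(1, p + 1):
--         a = helper_a_i_k(i, k)
--         coeffs[i] = a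
--         coeffs[k - 1 - i] = a
--     return coeffs
-- ===== SOURCE B (Python) =====
-- def helper_coeffs(k):
--     row = [1]
--     for n in range(2, k + 1):
--         prev = row
--         row = []
--         for m in range(n):
--             left = (m + 1) * prev[m] if m < n - 1 else 0
--             right = (n - m) * prev[m - 1] if m > 0 else 0
--             row.append(left + right)
--     return row
-- ===== Notes on version B (the rewrite author's own statement) =====
-- stated objective: alternative
-- what changed: B builds the whole Eulerian row with the triangle recurrence A(n,m)=(m+1)A(n-1,m)+(n-m)A(n-1,m-1), iterating rows from [1], instead of A's per-entry alternating closed-form sums of binomials and k-th powers with a symmetry mirror.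
-- outside the precondition, e.g. on helper_coeffs(0): A raises IndexError, B returns [1]
import Mathlib
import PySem

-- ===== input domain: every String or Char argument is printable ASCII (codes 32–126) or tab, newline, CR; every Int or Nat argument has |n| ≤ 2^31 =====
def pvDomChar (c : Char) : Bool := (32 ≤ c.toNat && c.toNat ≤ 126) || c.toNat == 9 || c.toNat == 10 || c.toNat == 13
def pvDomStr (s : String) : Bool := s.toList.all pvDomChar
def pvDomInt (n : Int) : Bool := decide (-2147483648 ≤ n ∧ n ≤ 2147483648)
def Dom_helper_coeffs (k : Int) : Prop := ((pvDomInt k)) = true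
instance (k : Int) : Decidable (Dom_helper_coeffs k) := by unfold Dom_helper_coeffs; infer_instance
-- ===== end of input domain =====

-- B replaces A's per-entry alternating closed-form sums of binomials and k-th powers by the
-- Eulerian triangle recurrence, building the whole row iteratively; objective: alternative.

-- ===== PORT A =====
-- sum over range(i+1); comb(k+1, j) and (i+1-j)**k exact on Pre_ (k ≥ 1, so k+1 ≥ 0 and exponent ≥ 0)
def helper_a_i_k (i k : Int) : Int :=
  (PySem.List.pyRange 0 (i + 1) 1).foldl
    (fun acc j =>
      acc + (-1 : Int) ^ j.toNat * ((k + 1).toNat.choose j.toNat : Int) * (i + 1 - j) ^ k.toNat) 0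

def helper_coeffs (k : Int) : List Int :=
  let c0 : List Int := List.replicate k.toNat 0          -- [0] * k  ([] for k ≤ 0)
  let c1 := PySem.List.pySetD c0 0 1                      -- coeffs[0] = 1 (IndexError for k ≤ 0: excluded by Pre_)
  let c2 := PySem.List.pySetD c1 (k - 1) 1                -- coeffs[k-1] = 1
  let p := PySem.Int.floordiv (k - 1) 2                   -- math.floor((k-1)/2), exact on Dom (|k| ≤ 2^31 < 2^53)
  (PySem.List.pyRange 1 (p + 1) 1).foldl
    (fun coeffs i =>
      let a := helper_a_i_k i k
      PySem.List.pySetD (PySem.List.pySetD coeffs i a) (k - 1 - i) a) c2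

-- ===== PORT B =====
-- prev[m] / prev[m-1] are guarded in Source B so the index is always in range; getD 0 is exact there
def helper_coeffs_alt (k : Int) : List Int :=
  (PySem.List.pyRange 2 (k + 1) 1).foldl
    (fun row n =>
      (PySem.List.pyRange 0 n 1).foldl
        (fun acc m =>
          let left := if m < n - 1 then (m + 1) * PySem.List.pyGetD row m 0 else 0
          let right := if m > 0 then (n - m) * PySem.List.pyGetD row (m - 1) 0 else 0
          acc ++ [left + right]) []) [1]

-- ===== PRECONDITION & SPEC =====
-- A raises IndexError (coeffs[0] = 1 on the empty list) for every k ≤ 0; Pre_ is exactly k ≥ 1.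
def Pre_helper_coeffs (k : Int) : Prop := 1 ≤ k
instance (k : Int) : Decidable (Pre_helper_coeffs k) := by unfold Pre_helper_coeffs; infer_instance
def pvWitness_helper_coeffs : Int := (5)

def Spec_helper_coeffs (k : Int) (out : List Int) : Prop := out = helper_coeffs_alt k
instance (k : Int) (out : List Int) : Decidable (Spec_helper_coeffs k out) := by unfold Spec_helper_coeffs; infer_instance

-- ===== CLAIM (what is proved, stated in full; the proofs are below) =====
def Claim_equal_helper_coeffs : Prop := ∀ (k : Int), Dom_helper_coeffs k → Pre_helper_coeffs k → Spec_helper_coeffs k (helper_coeffs k)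

-- ===== LEMMAS AND PROOFS =====

-- closed-form entry: Ecoef n m = Σ_{j≤m} (-1)^j C(n+1,j) (m+1-j)^n  (the value helper_a_i_k m n computes)
def Ecoef (n m : Nat) : Int :=
  ∑ j ∈ Finset.range (m + 1), (-1 : Int) ^ j * ((n + 1).choose j : Int) * ((m : Int) + 1 - (j : Int)) ^ n

-- B's inner loop as a function (definitionally the body of helper_coeffs_alt's outer fold)
def bstep (row : List Int) (n : Int) : List Int :=
  (PySem.List.pyRange 0 n 1).foldl
    (fun acc m =>
      let left := if m < n - 1 then (m + 1) * PySem.List.pyGetD row m 0 else 0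
      let right := if m > 0 then (n - m) * PySem.List.pyGetD row (m - 1) 0 else 0
      acc ++ [left + right]) []

-- B's row after t iterations of the outer loop
def G : Nat → List Int
  | 0 => [1]
  | t + 1 => bstep (G t) ((t : Int) + 2)

lemma helper_coeffs_alt_def (k : Int) :
    helper_coeffs_alt k = (PySem.List.pyRange 2 (k + 1) 1).foldl bstep [1] := rfl

-- A's loop body as a function (definitionally the body of helper_coeffs's fold)
def aStep (k : Int) (coeffs : List Int) (i : Int) : List Int :=
  PySem.List.pySetD (PySem.List.pySetD coeffs i (helper_a_i_k i k)) (k - 1 - i) (helper_a_i_k i k)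

lemma helper_coeffs_def (k : Int) :
    helper_coeffs k = (PySem.List.pyRange 1 (PySem.Int.floordiv (k - 1) 2 + 1) 1).foldl (aStep k)
      (PySem.List.pySetD (PySem.List.pySetD (List.replicate k.toNat 0) 0 1) (k - 1) 1) := rfl

lemma sum_map_range {M : Type} [AddCommMonoid M] (f : Nat → M) (N : Nat) :
    ((List.range N).map f).sum = ∑ j ∈ Finset.range N, f j := by
  induction N with
  | zero => simp
  | succ n ih => simp [List.range_succ, Finset.sum_range_succ, ih]

lemma Ecoef_zero (n : Nat) : Ecoef n 0 = 1 := by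
  simp [Ecoef]

lemma Ecoef_zero_row (m : Nat) (hm : 1 ≤ m) : Ecoef 0 m = 0 := by
  unfold Ecoef
  rw [← Finset.sum_subset (by intro x hx; simp only [Finset.mem_range] at *; omega :
        Finset.range 2 ⊆ Finset.range (m + 1))
      (fun x hx hx2 => by
        have h1 : 2 ≤ x := by simp only [Finset.mem_range] at hx2; omega
        have h0 : (0 + 1).choose x = 0 := Nat.choose_eq_zero_of_lt (by omega)
        simp [h0])]
  norm_num [Finset.sum_range_succ]

-- the triangle recurrence for the closed form
lemma Ecoef_core (n m : Nat) (hm : 1 ≤ m) :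
    Ecoef (n + 1) m = ((m : Int) + 1) * Ecoef n m + ((n : Int) + 1 - (m : Int)) * Ecoef n (m - 1) := by
  have hprev : Ecoef n (m - 1)
      = ∑ j ∈ Finset.range m, (-1 : Int) ^ j * ((n + 1).choose j : Int) * ((m : Int) - (j : Int)) ^ n := by
    unfold Ecoef
    rw [show m - 1 + 1 = m by omega]
    refine Finset.sum_congr rfl (fun j hj => ?_)
    have hc : ((m - 1 : Nat) : Int) = (m : Int) - 1 := by
      have := Nat.cast_sub (R := Int) hm
      simpa using this
    rw [hc]; ring_nf
  have hT : ∑ j ∈ Finset.range (m + 1),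
        (if j = 0 then 0
         else (-1 : Int) ^ j * ((n + 1).choose (j - 1) : Int) * ((m : Int) + 1 - (j : Int)) ^ n)
      = - ∑ j ∈ Finset.range m, (-1 : Int) ^ j * ((n + 1).choose j : Int) * ((m : Int) - (j : Int)) ^ n := by
    rw [Finset.sum_range_succ', if_pos rfl, add_zero, ← Finset.sum_neg_distrib]
    refine Finset.sum_congr rfl (fun j hj => ?_)
    rw [if_neg (by omega)]
    push_cast
    ring
  have hkey : ∀ j' : Nat,
      ((n + 2).choose (j' + 1) : Int) * (((m : Int) + 1) - ((j' : Int) + 1))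
        = ((m : Int) + 1) * ((n + 1).choose (j' + 1) : Int)
          - ((n : Int) + 1 - (m : Int)) * ((n + 1).choose j' : Int) := by
    intro j'
    by_cases hj : j' ≤ n + 1
    · have habs := Nat.choose_succ_right_eq (n + 1) j'
      have hsub : ((n + 1 - j' : Nat) : Int) = (n : Int) + 1 - (j' : Int) := by
        push_cast [Nat.cast_sub (by omega : j' ≤ n + 1)]; ring
      have habs' : ((n + 1).choose (j' + 1) : Int) * ((j' : Int) + 1)
          = ((n + 1).choose j' : Int) * ((n : Int) + 1 - (j' : Int)) := by
        rw [← hsub]; exact_mod_cast congrArg (Nat.cast (R := Int)) habs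
      have hpas : ((n + 2).choose (j' + 1) : Int)
          = ((n + 1).choose j' : Int) + ((n + 1).choose (j' + 1) : Int) := by
        exact_mod_cast congrArg (Nat.cast (R := Int)) (Nat.choose_succ_succ (n + 1) j')
      linear_combination ((m : Int) + 1 - ((j' : Int) + 1)) * hpas - habs'
    · have h1 : (n + 1).choose j' = 0 := Nat.choose_eq_zero_of_lt (by omega)
      have h2 : (n + 1).choose (j' + 1) = 0 := Nat.choose_eq_zero_of_lt (by omega)
      have h3 : (n + 2).choose (j' + 1) = 0 := Nat.choose_eq_zero_of_lt (by omega)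
      simp [h1, h2, h3]
  calc Ecoef (n + 1) m
      = ∑ j ∈ Finset.range (m + 1),
          (((m : Int) + 1) * ((-1 : Int) ^ j * ((n + 1).choose j : Int) * ((m : Int) + 1 - (j : Int)) ^ n)
            - ((n : Int) + 1 - (m : Int)) *
              (if j = 0 then 0
               else (-1 : Int) ^ j * ((n + 1).choose (j - 1) : Int) * ((m : Int) + 1 - (j : Int)) ^ n)) := by
        unfold Ecoef
        refine Finset.sum_congr rfl (fun j hj => ?_)
        rcases j with _ | j'
        · simp [pow_succ]; ring
        · rw [if_neg (Nat.succ_ne_zero _)]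
          have hk := hkey j'
          have hcast : (((j' + 1 : Nat)) : Int) = (j' : Int) + 1 := by push_cast; ring
          rw [show n + 1 + 1 = n + 2 from rfl, hcast,
            pow_succ ((m : Int) + 1 - ((j' : Int) + 1)) n, show (j' + 1) - 1 = j' from rfl]
          linear_combination ((-1 : Int) ^ (j' + 1) * (((m : Int) + 1 - ((j' : Int) + 1))) ^ n) * hk
    _ = ((m : Int) + 1) * Ecoef n m + ((n : Int) + 1 - (m : Int)) * Ecoef n (m - 1) := by
        rw [Finset.sum_sub_distrib, ← Finset.mul_sum, ← Finset.mul_sum, hT, hprev]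
        unfold Ecoef
        ring

lemma Ecoef_vanish (n : Nat) (hn : 1 ≤ n) : ∀ m, n ≤ m → Ecoef n m = 0 := by
  induction n with
  | zero => omega
  | succ n ih =>
    intro m hm
    rw [Ecoef_core n m (by omega)]
    rcases Nat.eq_zero_or_pos n with h | h
    · subst h
      rw [Ecoef_zero_row m (by omega)]
      by_cases hm1 : m = 1
      · subst hm1; rw [Ecoef_zero]; norm_num
      · rw [Ecoef_zero_row (m - 1) (by omega)]; ring
    · rw [ih h m (by omega), ih h (m - 1) (by omega)]; ring

lemma Ecoef_succ_last (t : Nat) : Ecoef (t + 2) (t + 1) = Ecoef (t + 1) t := by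
  rw [show t + 2 = (t + 1) + 1 from rfl, Ecoef_core (t + 1) (t + 1) (by omega),
    Ecoef_vanish (t + 1) (by omega) (t + 1) le_rfl,
    show (t + 1) - 1 = t from rfl]
  push_cast
  ring

lemma bstep_eq_map (row : List Int) (n : Int) :
    bstep row n = (List.range n.toNat).map (fun (m : Nat) =>
      (if (m : Int) < n - 1 then ((m : Int) + 1) * row.getD m 0 else 0) +
      (if 0 < m then (n - (m : Int)) * row.getD (m - 1) 0 else 0)) := by
  unfold bstep
  rw [PySem.List.foldl_append_singleton_eq_map, List.nil_append, PySem.List.pyRange_one,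
    sub_zero, List.map_map]
  refine List.map_congr_left (fun m hm => ?_)
  dsimp only [Function.comp]
  simp only [zero_add, PySem.List.pyGetD_natCast, gt_iff_lt, Nat.cast_pos]
  by_cases hm0 : 0 < m
  · have hc : (m : Int) - 1 = ((m - 1 : Nat) : Int) := by omega
    rw [hc, PySem.List.pyGetD_natCast]
  · have h0 : m = 0 := by omega
    subst h0
    simp

lemma G_length (t : Nat) : (G t).length = t + 1 := by
  cases t with
  | zero => rfl
  | succ t =>
    rw [G, bstep_eq_map]
    simp
    omega

lemma G_getD (t : Nat) : ∀ m, m ≤ t →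
    (G t).getD m 0 = Ecoef (t + 1) m ∧ (G t).getD m 0 = Ecoef (t + 1) (t - m) := by
  induction t with
  | zero =>
    intro m hm
    have h0 : m = 0 := by omega
    subst h0
    refine ⟨?_, ?_⟩ <;> · show (1 : Int) = Ecoef 1 0; rw [Ecoef_zero]
  | succ t ih =>
    intro m hm
    have htn : ((t : Int) + 2).toNat = t + 2 := by omega
    rw [G, bstep_eq_map, htn,
      PySem.List.getD_map_range _ _ m 0 (show m < t + 2 by omega)]
    have hcond1 : ((m : Int) < (t : Int) + 2 - 1) ↔ m < t + 1 := by omega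
    by_cases hm0 : m = 0
    · subst hm0
      rw [if_pos (by omega), if_neg (by omega)]
      obtain ⟨ih1, ih2⟩ := ih 0 (by omega)
      constructor
      · rw [ih1, Ecoef_zero, Ecoef_zero]; norm_num
      · rw [ih2, Nat.sub_zero, Nat.sub_zero, Ecoef_succ_last]; push_cast; ring
    · by_cases hmt : m = t + 1
      · subst hmt
        rw [if_neg (by omega), if_pos (by omega), show t + 1 - 1 = t from rfl]
        obtain ⟨ih1, ih2⟩ := ih t (by omega)
        constructor
        · rw [ih1, Ecoef_succ_last]; push_cast; ring
        · rw [ih2, Nat.sub_self, Ecoef_zero, Nat.sub_self, Ecoef_zero]; push_cast; ring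
      · -- 1 ≤ m ≤ t
        have hm1 : 1 ≤ m := by omega
        have hmt' : m ≤ t := by omega
        rw [if_pos (by omega), if_pos (by omega)]
        obtain ⟨ihm1, ihm2⟩ := ih m hmt'
        obtain ⟨ihp1, ihp2⟩ := ih (m - 1) (by omega)
        constructor
        · rw [ihm1, ihp1, show t + 1 + 1 = (t + 1) + 1 from rfl,
            Ecoef_core (t + 1) m hm1]
          push_cast; ring
        · rw [ihm2, ihp2, Ecoef_core (t + 1) (t + 1 - m) (by omega),
            show t + 1 - m - 1 = t - m by omega,
            show t - (m - 1) = t + 1 - m by omega,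
            show ((t + 1 - m : Nat) : Int) = (t : Int) + 1 - (m : Int) by omega]
          push_cast; ring

lemma alt_eq_G (k : Int) (hk : 1 ≤ k) : helper_coeffs_alt k = G (k - 1).toNat := by
  rw [helper_coeffs_alt_def]
  have aux : ∀ t : Nat, (PySem.List.pyRange 2 (2 + (t : Int)) 1).foldl bstep [1] = G t := by
    intro t
    induction t with
    | zero => rw [show (2 : Int) + ((0 : Nat) : Int) = 2 by norm_num,
        PySem.List.pyRange_one_eq_nil (by omega)]; rfl
    | succ t ih =>
      rw [show (2 + ((t + 1 : Nat) : Int)) = (2 + (t : Int)) + 1 by push_cast; ring,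
        PySem.List.pyRange_one_succ_right (by omega), List.foldl_append, ih]
      show bstep (G t) (2 + (t : Int)) = G (t + 1)
      rw [G, show (2 : Int) + (t : Int) = (t : Int) + 2 by ring]
  have h2 : k + 1 = 2 + (((k - 1).toNat : Nat) : Int) := by omega
  rw [h2, aux]

lemma helper_a_eq_E (i k : Int) (hi : 0 ≤ i) (hk : 1 ≤ k) :
    helper_a_i_k i k = Ecoef k.toNat i.toNat := by
  unfold helper_a_i_k
  rw [PySem.List.foldl_add, zero_add, PySem.List.pyRange_one, sub_zero, List.map_map,
    sum_map_range, show (i + 1).toNat = i.toNat + 1 by omega]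
  refine Finset.sum_congr rfl (fun j hj => ?_)
  dsimp only [Function.comp]
  simp only [zero_add, Int.toNat_natCast]
  rw [show (k + 1).toNat = k.toNat + 1 by omega,
    show i + 1 - (j : Int) = ((i.toNat : Nat) : Int) + 1 - (j : Int) by omega]

lemma set_map_range (K : Nat) (f : Nat → Int) (j : Nat) (v : Int) :
    ((List.range K).map f).set j v = (List.range K).map (fun x => if x = j then v else f x) := by
  apply List.ext_getElem <;> simp [List.getElem_set]
  intro i hi
  by_cases hij : i = j
  · subst hij; simp
  · rw [if_neg (fun h => hij h.symm), if_neg hij]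

lemma map_getD_range (xs : List Int) (K : Nat) (h : xs.length = K) :
    (List.range K).map (fun j => xs.getD j 0) = xs := by
  apply List.ext_getElem <;> simp [h]
  intro i hi h2
  rw [List.getElem?_eq_getElem (by omega)]
  rfl

lemma G_getD_K (k : Int) (hk : 1 ≤ k) (m : Nat) (hm : m ≤ k.toNat - 1) :
    (G (k.toNat - 1)).getD m 0 = Ecoef k.toNat m ∧
    (G (k.toNat - 1)).getD m 0 = Ecoef k.toNat (k.toNat - 1 - m) := by
  have h := G_getD (k.toNat - 1) m hm
  rwa [show k.toNat - 1 + 1 = k.toNat by omega] at h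

-- the value at index j after the first t iterations of A's loop
def AInv (k : Int) (t j : Nat) : Int :=
  if j = 0 ∨ j = k.toNat - 1 ∨ (1 ≤ j ∧ j ≤ t) ∨ (k.toNat - 1 - t ≤ j ∧ j ≤ k.toNat - 2) then
    (G (k.toNat - 1)).getD j 0
  else 0

lemma A_invariant (k : Int) (hk : 1 ≤ k) :
    ∀ t : Nat, t ≤ ((k - 1) / 2).toNat →
    (PySem.List.pyRange 1 ((t : Int) + 1) 1).foldl (aStep k)
      (PySem.List.pySetD (PySem.List.pySetD (List.replicate k.toNat 0) 0 1) (k - 1) 1)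
    = (List.range k.toNat).map (AInv k t) := by
  intro t
  induction t with
  | zero =>
    intro _
    rw [show (((0 : Nat) : Int)) + 1 = 1 by norm_num, PySem.List.pyRange_one_eq_nil le_rfl,
      List.foldl_nil]
    have h1 : List.replicate k.toNat (0 : Int) = (List.range k.toNat).map (fun _ => 0) := by
      simp
    rw [h1, PySem.List.pySetD_of_nonneg _ _ (by omega : (0 : Int) ≤ k - 1),
      PySem.List.pySetD_of_nonneg _ _ (le_refl (0 : Int)), Int.toNat_zero, set_map_range,
      set_map_range]
    refine List.map_congr_left (fun x hx => ?_)
    rw [List.mem_range] at hx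
    have hA : AInv k 0 x = if x = 0 ∨ x = k.toNat - 1 then 1 else 0 := by
      unfold AInv
      by_cases h : x = 0 ∨ x = k.toNat - 1
      · rw [if_pos (by omega), if_pos h]
        rcases h with h | h
        · subst h; rw [(G_getD_K k hk 0 (by omega)).1, Ecoef_zero]
        · subst h; rw [(G_getD_K k hk (k.toNat - 1) le_rfl).2,
            show k.toNat - 1 - (k.toNat - 1) = 0 by omega, Ecoef_zero]
      · rw [if_neg (by omega), if_neg h]
    rw [hA, show (k - 1).toNat = k.toNat - 1 by omega]
    split_ifs <;> first | rfl | omega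
  | succ t ih =>
    intro ht
    have hK : 1 ≤ k.toNat := by omega
    have htk : (t : Int) + 1 ≤ (k - 1) / 2 := by omega
    have hbound : 2 * (t + 1) + 1 ≤ k.toNat := by omega
    rw [show (((t + 1 : Nat) : Int)) + 1 = ((t : Int) + 1) + 1 by push_cast; ring,
      PySem.List.pyRange_one_succ_right (by omega), List.foldl_append, ih (by omega),
      List.foldl_cons, List.foldl_nil]
    unfold aStep
    rw [helper_a_eq_E _ _ (by omega) hk, show ((t : Int) + 1).toNat = t + 1 by omega,
      PySem.List.pySetD_of_nonneg _ _ (show (0 : Int) ≤ k - 1 - ((t : Int) + 1) by omega),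
      PySem.List.pySetD_of_nonneg _ _ (show (0 : Int) ≤ (t : Int) + 1 by omega),
      show ((t : Int) + 1).toNat = t + 1 by omega,
      show (k - 1 - ((t : Int) + 1)).toNat = k.toNat - 2 - t by omega,
      set_map_range, set_map_range]
    refine List.map_congr_left (fun x hx => ?_)
    rw [List.mem_range] at hx
    by_cases hx1 : x = k.toNat - 2 - t
    · subst hx1
      rw [if_pos rfl]
      unfold AInv
      rw [if_pos (by omega), (G_getD_K k hk (k.toNat - 2 - t) (by omega)).2,
        show k.toNat - 1 - (k.toNat - 2 - t) = t + 1 by omega]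
    · by_cases hx2 : x = t + 1
      · subst hx2
        rw [if_neg hx1, if_pos rfl]
        unfold AInv
        rw [if_pos (by omega), (G_getD_K k hk (t + 1) (by omega)).1]
      · rw [if_neg hx1, if_neg hx2]
        unfold AInv
        by_cases hc : (x = 0 ∨ x = k.toNat - 1 ∨ (1 ≤ x ∧ x ≤ t) ∨
            (k.toNat - 1 - t ≤ x ∧ x ≤ k.toNat - 2))
        · rw [if_pos hc, if_pos (by omega)]
        · rw [if_neg hc, if_neg (by omega)]

-- ===== VERDICT (by name: the statement is the Claim_ definition above) =====
theorem helper_coeffs_spec : Claim_equal_helper_coeffs := by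
  intro k hdom hk
  show helper_coeffs k = helper_coeffs_alt k
  have hk' : (1 : Int) ≤ k := hk
  rw [helper_coeffs_def, PySem.Int.floordiv_eq_ediv_of_pos (by omega)]
  have hp0 : 0 ≤ (k - 1) / 2 := by omega
  rw [show (k - 1) / 2 + 1 = ((((k - 1) / 2).toNat : Nat) : Int) + 1 by omega,
    A_invariant k hk' ((k - 1) / 2).toNat le_rfl]
  have hlen : (G (k.toNat - 1)).length = k.toNat := by rw [G_length]; omega
  rw [alt_eq_G k hk', show (k - 1).toNat = k.toNat - 1 by omega,
    ← map_getD_range (G (k.toNat - 1)) k.toNat hlen]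
  refine List.map_congr_left (fun x hx => ?_)
  rw [List.mem_range] at hx
  unfold AInv
  have hcov : x = 0 ∨ x = k.toNat - 1 ∨ (1 ≤ x ∧ x ≤ ((k - 1) / 2).toNat) ∨
      (k.toNat - 1 - ((k - 1) / 2).toNat ≤ x ∧ x ≤ k.toNat - 2) := by omega
  rw [if_pos hcov]
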